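-- pv_equiv track=rewrite | github.com/winatecommerce96/emailpilot-rag | pipelines/meeting-ingestion/core/scanner.py | _is_external_meeting
-- ===== SOURCE A (Python) =====
-- from typing import List, Dict, Any, Optional
--
-- def _is_external_meeting(event: Dict, allowed_domains: List[str] = None) -> bool:
--     """Check if any attendee is external or matches allowed domains."""
--     attendees = event.get('attendees', [])
--     if not attendees:
--         return False
--
--     if allowed_domains:
--         for attendee in attendees:
--             email = attendee.get('email', '').lower()
--             if any(email.endswith(f"@{d.lower()}") for d in allowed_domains):
--                 return True
--         return False
--
--     # Heuristic: at least 2 attendees means a real meeting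
--     return len(attendees) >= 2
-- ===== SOURCE B (Python) =====
-- def _is_external_meeting(event, allowed_domains=None):
--     """Check if any attendee is external or matches allowed domains."""
--     attendees = event.get('attendees', [])
--     if not attendees:
--         return False
--
--     if allowed_domains:
--         allowed = {d.lower() for d in allowed_domains}
--         seen = set()
--         for attendee in attendees:
--             _, sep, domain = attendee.get('email', '').lower().rpartition('@')
--             if sep:
--                 seen.add(domain)
--         return not seen.isdisjoint(allowed)
--
--     # Heuristic: at least 2 attendees means a real meeting
--     return len(attendees) >= 2
-- ===== Notes on version B (the rewrite author's own statement) =====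
-- stated objective: alternative
-- what changed: The nested attendee-by-domain endswith scan with early return is replaced by a single pass that rpartitions each lowered email at its last '@' into a set of attendee domains, then tests that set against the set of lowered allowed domains; Pre_ excludes inputs where some allowed domain itself contains '@' (a malformed domain), on which A's substring endswith match against a mid-email '@' is an artefact.
-- outside the precondition, e.g. on _is_external_meeting({'attendees': [{'email': 'a@b@c.com'}]}, ['b@c.com']): A returns True, B returns False
import Mathlib
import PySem

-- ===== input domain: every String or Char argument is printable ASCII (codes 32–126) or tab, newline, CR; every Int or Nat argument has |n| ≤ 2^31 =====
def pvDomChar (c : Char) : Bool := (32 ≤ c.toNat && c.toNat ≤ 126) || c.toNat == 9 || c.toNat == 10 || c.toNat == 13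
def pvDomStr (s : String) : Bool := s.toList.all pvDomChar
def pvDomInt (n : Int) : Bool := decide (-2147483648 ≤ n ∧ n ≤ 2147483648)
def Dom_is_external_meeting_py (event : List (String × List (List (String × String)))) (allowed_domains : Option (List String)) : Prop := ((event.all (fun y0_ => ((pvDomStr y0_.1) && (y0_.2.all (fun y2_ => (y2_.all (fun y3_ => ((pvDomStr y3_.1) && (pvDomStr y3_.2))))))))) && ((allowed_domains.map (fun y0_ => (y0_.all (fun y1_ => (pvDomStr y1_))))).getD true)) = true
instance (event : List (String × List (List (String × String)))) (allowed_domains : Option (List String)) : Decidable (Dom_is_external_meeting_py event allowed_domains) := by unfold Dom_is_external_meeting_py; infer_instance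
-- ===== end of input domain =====

-- B replaces A's nested attendee-by-domain endswith scan with one pass that rpartitions each
-- lowered email at its last '@' into a set of attendee domains and tests it against the set of
-- lowered allowed domains (alternative decomposition, same result on Pre_).

-- ===== PORT A =====
-- dict.get(k, dflt) on an association list (first match)
def pvAssocGetD {α : Type} (l : List (String × α)) (k : String) (dflt : α) : α :=
  match l with
  | [] => dflt
  | (k', v) :: rest => if k' == k then v else pvAssocGetD rest k dflt

def is_external_meeting_py (event : List (String × List (List (String × String)))) (allowed_domains : Option (List String)) : Bool :=
  let attendees := pvAssocGetD event "attendees" []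
  if attendees.isEmpty then false
  else if (match allowed_domains with | some ds => !ds.isEmpty | none => false) then
    -- for attendee in attendees: if any(email.endswith("@"+d.lower()) for d in allowed_domains): return True
    let ds := allowed_domains.getD []
    attendees.any (fun attendee =>
      let email := PySem.Chars.lower ((pvAssocGetD attendee "email" "").toList)
      ds.any (fun d => PySem.Chars.endswith email ('@' :: PySem.Chars.lower d.toList)))
  else decide (2 ≤ attendees.length)

-- ===== PORT B =====
-- email.rpartition('@'): the tail after the LAST '@', none if '@' is absent
def pvTailAfterAt (email : List Char) : Option (List Char) :=
  match email with
  | [] => none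
  | c :: rest =>
    match pvTailAfterAt rest with
    | some t => some t
    | none => if c == '@' then some rest else none

def is_external_meeting_py_alt (event : List (String × List (List (String × String)))) (allowed_domains : Option (List String)) : Bool :=
  let attendees := pvAssocGetD event "attendees" []
  if attendees.isEmpty then false
  else if (match allowed_domains with | some ds => !ds.isEmpty | none => false) then
    let ds := allowed_domains.getD []
    let allowed : PySem.Set (List Char) :=
      PySem.Set.ofList (ds.map (fun d => PySem.Chars.lower d.toList))
    let seen : PySem.Set (List Char) :=
      attendees.foldl (fun s attendee =>
        match pvTailAfterAt (PySem.Chars.lower ((pvAssocGetD attendee "email" "").toList)) with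
        | some t => PySem.Set.add s t
        | none => s) PySem.Set.empty
    !(PySem.Set.isdisjoint seen allowed)
  else decide (2 ≤ attendees.length)

-- ===== PRECONDITION & SPEC =====
-- Pre_ excludes inputs where some allowed domain itself contains '@' (a malformed domain), on
-- which A's substring endswith match against a mid-email '@' is an accidental artefact while B
-- matches only the part after the last '@'.
def Pre_is_external_meeting_py (event : List (String × List (List (String × String)))) (allowed_domains : Option (List String)) : Prop :=
  ∀ d ∈ allowed_domains.getD [], '@' ∉ d.toList
instance (event : List (String × List (List (String × String)))) (allowed_domains : Option (List String)) : Decidable (Pre_is_external_meeting_py event allowed_domains) := by unfold Pre_is_external_meeting_py; infer_instance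

def pvWitness_is_external_meeting_py : (List (String × List (List (String × String)))) × Option (List String) :=
  ([("attendees", [[("email", "a@X.com")]])], some ["x.com"])

def Spec_is_external_meeting_py (event : List (String × List (List (String × String)))) (allowed_domains : Option (List String)) (out : Bool) : Prop := out = is_external_meeting_py_alt event allowed_domains
instance (event : List (String × List (List (String × String)))) (allowed_domains : Option (List String)) (out : Bool) : Decidable (Spec_is_external_meeting_py event allowed_domains out) := by unfold Spec_is_external_meeting_py; infer_instance

-- ===== CLAIM (what is proved, stated in full; the proofs are below) =====
def Claim_equal_is_external_meeting_py : Prop := ∀ (event : List (String × List (List (String × String)))) (allowed_domains : Option (List String)), Dom_is_external_meeting_py event allowed_domains → Pre_is_external_meeting_py event allowed_domains → Spec_is_external_meeting_py event allowed_domains (is_external_meeting_py event allowed_domains)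

-- ===== LEMMAS AND PROOFS =====

-- lowering a character only produces '@' from '@'
lemma lowerChar_eq_at {c : Char} (h : PySem.Chars.lowerChar c = '@') : c = '@' := by
  unfold PySem.Chars.lowerChar at h
  split_ifs at h with hu
  · exfalso
    simp only [PySem.Chars.isupper, Bool.and_eq_true, decide_eq_true_eq, Char.le_def,
      UInt32.le_iff_toNat_le] at hu
    obtain ⟨h3, h2⟩ : 65 ≤ c.toNat ∧ c.toNat ≤ 90 := hu
    have hv : Nat.isValidChar (c.toNat + 32) := Or.inl (by omega)
    have h1 : (Char.ofNat (c.toNat + 32)).toNat = ('@' : Char).toNat := by rw [h]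
    rw [Char.toNat_ofNat, if_pos hv] at h1
    have h4 : ('@' : Char).toNat = 64 := by decide
    omega
  · exact h

lemma at_not_mem_lower {l : List Char} (h : '@' ∉ l) : '@' ∉ PySem.Chars.lower l := by
  intro hm
  obtain ⟨c, hc, he⟩ := List.mem_map.1 hm
  exact h (lowerChar_eq_at he ▸ hc)

lemma pvTailAfterAt_eq_none {l : List Char} : pvTailAfterAt l = none ↔ '@' ∉ l := by
  induction l with
  | nil => simp [pvTailAfterAt]
  | cons c rest ih =>
    simp only [pvTailAfterAt, List.mem_cons]
    cases h : pvTailAfterAt rest with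
    | some t =>
      have : '@' ∈ rest := by
        by_contra hn
        rw [← ih] at hn
        simp [h] at hn
      simp [this]
    | none =>
      have hr : '@' ∉ rest := ih.1 h
      by_cases hc : c = '@'
      · simp [hc]
      · have : ¬ ('@' = c) := fun he => hc he.symm
        simp [hc, this, hr]

lemma pvTailAfterAt_sound {l t : List Char} (h : pvTailAfterAt l = some t) :
    ('@' :: t) <:+ l ∧ '@' ∉ t := by
  induction l with
  | nil => simp [pvTailAfterAt] at h
  | cons c rest ih =>
    simp only [pvTailAfterAt] at h
    cases hr : pvTailAfterAt rest with
    | some t' =>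
      rw [hr] at h
      obtain rfl : t' = t := by simpa using h
      obtain ⟨hs, hn⟩ := ih hr
      exact ⟨hs.trans (List.suffix_cons c rest), hn⟩
    | none =>
      rw [hr] at h
      by_cases hc : c = '@'
      · simp [hc] at h
        subst h
        exact ⟨hc ▸ List.suffix_refl _, pvTailAfterAt_eq_none.1 hr⟩
      · simp [hc] at h

lemma pvTailAfterAt_complete {l t : List Char} (hs : ('@' :: t) <:+ l) (ht : '@' ∉ t) :
    pvTailAfterAt l = some t := by
  induction l with
  | nil => simp at hs
  | cons c rest ih =>
    rcases List.suffix_cons_iff.1 hs with heq | hsuf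
    · injection heq with h1 h2
      subst h1; subst h2
      simp [pvTailAfterAt, pvTailAfterAt_eq_none.2 ht]
    · simp [pvTailAfterAt, ih hsuf]

-- membership in the set accumulated over all attendees
lemma mem_foldl_seen (atts : List (List (String × String))) (s : PySem.Set (List Char)) (x : List Char) :
    x ∈ atts.foldl (fun s attendee =>
        match pvTailAfterAt (PySem.Chars.lower ((pvAssocGetD attendee "email" "").toList)) with
        | some t => PySem.Set.add s t
        | none => s) s ↔
      x ∈ s ∨ ∃ a ∈ atts, pvTailAfterAt (PySem.Chars.lower ((pvAssocGetD a "email" "").toList)) = some x := by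
  induction atts generalizing s with
  | nil => simp
  | cons a rest ih =>
    simp only [List.foldl_cons, ih, List.mem_cons]
    cases h : pvTailAfterAt (PySem.Chars.lower ((pvAssocGetD a "email" "").toList)) with
    | some t => simp only [h, PySem.Set.mem_add]; aesop
    | none => simp only [h]; aesop

-- ===== VERDICT (by name: the statement is the Claim_ definition above) =====
theorem is_external_meeting_py_spec : Claim_equal_is_external_meeting_py := by
  intro event allowed_domains _ hpre
  unfold Spec_is_external_meeting_py
  rcases allowed_domains with _ | ds
  · simp [is_external_meeting_py, is_external_meeting_py_alt]
  · by_cases hds : ds.isEmpty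
    · simp [is_external_meeting_py, is_external_meeting_py_alt, hds]
    · simp only [is_external_meeting_py, is_external_meeting_py_alt, hds, Bool.not_false, if_true,
        Option.getD_some]
      by_cases h1 : (pvAssocGetD event "attendees" ([] : List (List (String × String)))).isEmpty
      · simp [h1]
      · simp only [h1, Bool.false_eq_true, if_false]
        have hpre' : ∀ d ∈ ds, '@' ∉ d.toList := by
          intro d hd; exact hpre d (by simpa using hd)
        rw [Bool.eq_iff_iff, List.any_eq_true, Bool.not_eq_true', ← Bool.not_eq_true,
          PySem.Set.isdisjoint_iff]
        push_neg
        constructor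
        · rintro ⟨a, ha, hd⟩
          rw [List.any_eq_true] at hd
          obtain ⟨d, hd, he⟩ := hd
          have hsuf := (PySem.Chars.endswith_iff _ _).1 he
          have hx := pvTailAfterAt_complete hsuf (at_not_mem_lower (hpre' d hd))
          refine ⟨PySem.Chars.lower d.toList, (mem_foldl_seen _ _ _).2 (Or.inr ⟨a, ha, hx⟩), ?_⟩
          rw [PySem.Set.mem_ofList]
          exact List.mem_map.2 ⟨d, hd, rfl⟩
        · rintro ⟨x, hx, hall⟩
          rw [mem_foldl_seen] at hx
          rcases hx with hx | ⟨a, ha, he⟩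
          · simp [PySem.Set.empty] at hx
          · refine ⟨a, ha, List.any_eq_true.2 ?_⟩
            rw [PySem.Set.mem_ofList] at hall
            obtain ⟨d, hd, rfl⟩ := List.mem_map.1 hall
            exact ⟨d, hd, (PySem.Chars.endswith_iff _ _).2 (pvTailAfterAt_sound he).1⟩
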